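-- pv_equiv track=rewrite | github.com/seohyun319/Algorithm | ICPC/algo_camp/2_string/23304.py | is_akaraka_pallendrom
-- ===== SOURCE A (Python) =====
-- def is_akaraka_pallendrom(string):
--     if len(string) == 1: return True
--     half_len = len(string) // 2
--     if string != string[::-1]:
--         return False
--     left = string[: half_len]
--     right = string[-half_len :]
--     if left != right:
--         return False
--     if not is_akaraka_pallendrom(left):
--         return False
--
--     return True
-- ===== SOURCE B (Python) =====
-- def is_akaraka_pallendrom(string):
--     # Characterization: the recursive akaraka property holds iff every prefix of
--     # length n, n//2, n//4, ... (down to length > 1) is itself a palindrome.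
--     lengths = []
--     n = len(string)
--     while n > 1:
--         lengths.append(n)
--         n //= 2
--     return all(string[:m] == string[:m][::-1] for m in lengths)
-- ===== Notes on version B (the rewrite author's own statement) =====
-- stated objective: alternative
-- what changed: A's recursion on the shrinking left half is replaced by a characterization: the property holds iff every prefix of length n, n//2, n//4, ... is a palindrome; B collects those lengths in one loop and then checks each prefix with all(), with no recursion and no half-vs-half comparison.
import Mathlib
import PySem

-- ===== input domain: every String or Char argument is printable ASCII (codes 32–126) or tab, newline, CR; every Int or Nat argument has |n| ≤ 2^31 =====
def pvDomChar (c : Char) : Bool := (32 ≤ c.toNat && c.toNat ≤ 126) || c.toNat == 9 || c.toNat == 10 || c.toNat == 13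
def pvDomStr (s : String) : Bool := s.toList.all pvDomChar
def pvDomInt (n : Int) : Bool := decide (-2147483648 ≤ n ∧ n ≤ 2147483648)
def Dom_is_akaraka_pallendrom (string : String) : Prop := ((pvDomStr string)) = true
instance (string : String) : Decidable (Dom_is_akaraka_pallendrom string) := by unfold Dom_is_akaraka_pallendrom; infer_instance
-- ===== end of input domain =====

-- B replaces A's recursion by a characterization: the property holds iff every prefix of length n, n//2, n//4, ... is a palindrome; B collects the lengths and checks each prefix (alternative algorithm).


-- ===== PORT A =====
-- Recursive transliteration of A on the character list.  `fuel` only makes the definition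
-- total: with fuel = length + 1 it is never exhausted on a nonempty string; on '' Python A
-- recurses forever (RecursionError), which Pre_ excludes.
def akaAux : Nat → List Char → Bool
  | 0, _ => false
  | fuel + 1, s =>
    if s.length = 1 then true
    else
      let half_len := s.length / 2
      if s ≠ s.reverse then false
      else
        let left := PySem.List.slice s none (some (half_len : Int))
        let right := PySem.List.slice s (some (-(half_len : Int))) none
        if left ≠ right then false
        else if !(akaAux fuel left) then false
        else true

def is_akaraka_pallendrom (string : String) : Bool := akaAux (string.toList.length + 1) string.toList

-- ===== PORT B =====
-- B's `while n > 1` loop collecting the prefix lengths, as a fuel-indexed recursion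
-- (fuel = length + 1 suffices), followed by the `all(...)` over palindrome checks.
def lensLoop : Nat → Nat → List Nat
  | 0, _ => []
  | fuel + 1, n => if n > 1 then n :: lensLoop fuel (n / 2) else []

def is_akaraka_pallendrom_alt (string : String) : Bool :=
  (lensLoop (string.toList.length + 1) string.toList.length).all
    (fun m => decide (PySem.List.slice string.toList none (some (m : Int))
                      = (PySem.List.slice string.toList none (some (m : Int))).reverse))

-- ===== PRECONDITION & SPEC =====
-- Pre_ excludes only the empty string, on which A raises RecursionError (infinite recursion on '').
def Pre_is_akaraka_pallendrom (string : String) : Prop := string ≠ ""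
instance (string : String) : Decidable (Pre_is_akaraka_pallendrom string) := by unfold Pre_is_akaraka_pallendrom; infer_instance
def pvWitness_is_akaraka_pallendrom : String := "aba"

def Spec_is_akaraka_pallendrom (string : String) (out : Bool) : Prop := out = is_akaraka_pallendrom_alt string
instance (string : String) (out : Bool) : Decidable (Spec_is_akaraka_pallendrom string out) := by unfold Spec_is_akaraka_pallendrom; infer_instance

-- ===== CLAIM (what is proved, stated in full; the proofs are below) =====
def Claim_equal_is_akaraka_pallendrom : Prop := ∀ (string : String), Dom_is_akaraka_pallendrom string → Pre_is_akaraka_pallendrom string → Spec_is_akaraka_pallendrom string (is_akaraka_pallendrom string)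

-- ===== LEMMAS AND PROOFS =====

theorem lensLoop_mem_le (f : Nat) : ∀ n m, m ∈ lensLoop f n → m ≤ n := by
  induction f with
  | zero => intro n m h; simp [lensLoop] at h
  | succ f ih =>
    intro n m h
    rw [lensLoop] at h
    split at h
    · rcases List.mem_cons.mp h with h | h
      · omega
      · have := ih _ _ h; omega
    · simp at h

theorem all_ext {α : Type} (L : List α) (c₁ c₂ : α → Bool) (h : ∀ m ∈ L, c₁ m = c₂ m) :
    L.all c₁ = L.all c₂ := by
  induction L with
  | nil => rfl
  | cons a L ih =>
    simp only [List.all_cons]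
    rw [h a (List.mem_cons_self), ih (fun m hm => h m (List.mem_cons_of_mem a hm))]

theorem akaAux_eq (f : Nat) : ∀ (g : Nat) (s : List Char), s.length < f → s.length < g → s ≠ [] →
    akaAux f s = (lensLoop g s.length).all
      (fun m => decide (PySem.List.slice s none (some (m : Int))
                        = (PySem.List.slice s none (some (m : Int))).reverse)) := by
  induction f with
  | zero => intro g s hf; exact absurd hf (Nat.not_lt_zero _)
  | succ f ih =>
    intro g s hf hg hne
    cases g with
    | zero => exact absurd hg (Nat.not_lt_zero _)
    | succ g =>
      have hpos : 0 < s.length := List.length_pos_iff.mpr hne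
      rw [akaAux, lensLoop]
      by_cases h1 : s.length = 1
      · simp [h1]
      · have h2 : 1 < s.length := by omega
        simp only [h1, if_false, if_pos h2, List.all_cons]
        have hsl : PySem.List.slice s none (some ((s.length : Nat) : Int)) = s := by
          rw [PySem.List.slice_to_natCast]; simp
        rw [hsl]
        by_cases hp : s = s.reverse
        · rw [← hp]
          simp only [ne_eq, not_true_eq_false, if_false, decide_true, Bool.true_and]
          set half := s.length / 2 with hhalf
          have hhp : 0 < half := by omega
          have hL : PySem.List.slice s none (some (half : Int)) = s.take half :=
            PySem.List.slice_to_natCast s half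
          have hR : PySem.List.slice s (some (-(half : Int))) none = s.drop (s.length - half) :=
            PySem.List.slice_from_neg_natCast s half hhp
          have hdrop : s.drop (s.length - half) = (s.take half).reverse := by
            have h3 : (s.drop (s.length - half)).reverse
                = s.reverse.take (s.length - (s.length - half)) := List.reverse_drop
            have h4 : s.length - (s.length - half) = half := by omega
            rw [h4, ← hp] at h3
            calc s.drop (s.length - half) = (s.drop (s.length - half)).reverse.reverse := by simp
              _ = (s.take half).reverse := by rw [h3]
          have htlen : (s.take half).length = half := by simp; omega
          by_cases hq : s.take half = (s.take half).reverse
          · have heq : PySem.List.slice s none (some (half : Int))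
                = PySem.List.slice s (some (-(half : Int))) none := by
              rw [hL, hR, hdrop, ← hq]
            rw [if_neg (not_not_intro heq)]
            have hrec := ih g (s.take half) (by omega) (by omega)
              (by intro h; rw [h] at htlen; simp at htlen; omega)
            have hcong : (lensLoop g (s.length / 2)).all
                (fun m => decide (PySem.List.slice s none (some (m : Int))
                          = (PySem.List.slice s none (some (m : Int))).reverse))
              = (lensLoop g (s.take half).length).all
                (fun m => decide (PySem.List.slice (s.take half) none (some (m : Int))
                          = (PySem.List.slice (s.take half) none (some (m : Int))).reverse)) := by
              rw [htlen]
              apply all_ext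
              intro m hm
              have hm' : m ≤ half := lensLoop_mem_le g _ m hm
              have hpref : PySem.List.slice s none (some (m : Int))
                  = PySem.List.slice (s.take half) none (some (m : Int)) := by
                rw [PySem.List.slice_to_natCast, PySem.List.slice_to_natCast,
                  List.take_take, Nat.min_eq_left hm']
              rw [hpref]
            rw [hL, hcong, ← hrec]
            cases akaAux f (s.take half) <;> rfl
          · have hne2 : PySem.List.slice s none (some (half : Int))
                ≠ PySem.List.slice s (some (-(half : Int))) none := by
              rw [hL, hR, hdrop]; exact fun h => hq h
            rw [if_pos hne2]
            have hh2 : 1 < half := by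
              by_contra h
              have h1' : half = 1 := by omega
              apply hq
              rcases s with _ | ⟨c, t⟩
              · simp at hpos
              · rw [h1']; simp
            cases g with
            | zero => omega
            | succ g' =>
              rw [lensLoop]
              rw [if_pos (by omega : s.length / 2 > 1)]
              simp only [List.all_cons]
              rw [show ((s.length / 2 : Nat) : Int) = ((half : Nat) : Int) by rw [hhalf], hL]
              simp [hq]
        · have hp' : s ≠ s.reverse := hp
          rw [if_pos hp']
          simp [hp]

-- ===== VERDICT (by name: the statement is the Claim_ definition above) =====
theorem is_akaraka_pallendrom_spec : Claim_equal_is_akaraka_pallendrom := by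
  intro s _ hpre
  unfold Spec_is_akaraka_pallendrom is_akaraka_pallendrom is_akaraka_pallendrom_alt
  exact akaAux_eq (s.toList.length + 1) (s.toList.length + 1) s.toList
    (Nat.lt_succ_self _) (Nat.lt_succ_self _)
    (fun hn => hpre (String.toList_eq_nil_iff.mp hn))
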